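-- pv_equiv track=rewrite | github.com/yzheng21/Leetcode | leetcode/two_pointer/two sum difference to target.py | twoSum7
-- ===== SOURCE A (Python) =====
-- def twoSum7(nums, target):
--     res = [1] * 2
--     if nums is None or len(nums) < 2:
--         return res
--     if target < 0:
--         target = -target
--     pair = list(nums)
--     pair.sort()
--     j = 0
--     for i in range(len(nums)):
--         if i == j:
--             j += 1
--         while j < len(nums) and pair[j] - pair[i] < target:
--             j += 1
--         if j < len(nums) and pair[j] - pair[i] == target:
--             res[0] = nums.index(pair[i]) + 1
--             res[1] = nums.index(pair[j]) + 1
--             if res[0] > res[1]: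
--                 res[0], res[1] = res[1], res[0]
--             return res
--     return res
-- ===== SOURCE B (Python) =====
-- def twoSum7(nums, target):
--     if nums is None or len(nums) < 2:
--         return [1, 1]
--     t = -target if target < 0 else target
--     vals = set(nums)
--     for v in sorted(vals):
--         if (t > 0 and v + t in vals) or (t == 0 and nums.count(v) >= 2):
--             a = nums.index(v) + 1
--             b = nums.index(v + t) + 1
--             return [a, b] if a <= b else [b, a]
--     return [1, 1]
-- ===== Notes on version B (the rewrite author's own statement) =====
-- stated objective: alternative
-- what changed: Replaces the sorted two-pointer sweep over all positions by a scan over the sorted set of distinct values, testing for each value v whether v+|target| is present in the set (or, for target 0, occurs at least twice), then mapping the two values back to 1-based first-occurrence indices.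
import Mathlib
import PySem

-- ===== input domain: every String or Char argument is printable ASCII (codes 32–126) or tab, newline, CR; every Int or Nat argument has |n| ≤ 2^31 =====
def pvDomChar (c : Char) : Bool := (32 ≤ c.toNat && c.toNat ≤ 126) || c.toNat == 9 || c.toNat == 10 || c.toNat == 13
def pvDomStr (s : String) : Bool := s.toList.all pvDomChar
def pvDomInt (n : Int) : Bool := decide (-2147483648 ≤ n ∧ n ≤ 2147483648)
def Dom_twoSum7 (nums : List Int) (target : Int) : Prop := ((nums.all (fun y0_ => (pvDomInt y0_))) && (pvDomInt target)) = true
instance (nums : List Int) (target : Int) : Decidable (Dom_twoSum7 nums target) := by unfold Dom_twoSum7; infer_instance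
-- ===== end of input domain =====

-- B replaces A's two-pointer sweep over the sorted copy by a scan over the sorted DISTINCT values
-- with a set-membership test (alternative algorithm; not claimed faster).

-- ===== PORT A =====
-- 1-based first-occurrence index: nums.index(v) + 1 (only called with v ∈ nums, so index? is some)
def pvIdx1 (nums : List Int) (v : Int) : Int :=
  ((PySem.List.index? nums v).getD 0 : Int) + 1

-- while j < len(nums) and pair[j] - pair[i] < target: j += 1   (indices in range, so getD is exact)
def twoSumA_adv (pair : List Int) (vi t : Int) (j : Nat) : Nat :=
  if j < pair.length ∧ pair.getD j 0 - vi < t then twoSumA_adv pair vi t (j + 1) else j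
  termination_by pair.length - j
  decreasing_by omega

-- the for-i loop carrying the persistent pointer j
def twoSumA_loop (nums pair : List Int) (t : Int) (i j : Nat) : List Int :=
  if i < nums.length then
    let j1 := if i = j then j + 1 else j
    let j2 := twoSumA_adv pair (pair.getD i 0) t j1
    if j2 < nums.length ∧ pair.getD j2 0 - pair.getD i 0 = t then
      let r0 := pvIdx1 nums (pair.getD i 0)
      let r1 := pvIdx1 nums (pair.getD j2 0)
      if r0 > r1 then [r1, r0] else [r0, r1]
    else twoSumA_loop nums pair t (i + 1) j2
  else [1, 1]
  termination_by nums.length - i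
  decreasing_by omega

def twoSum7 (nums : List Int) (target : Int) : List Int :=
  let res := [1, 1]
  if nums.length < 2 then res
  else
    let t := if target < 0 then -target else target
    let pair := PySem.List.sorted nums (fun x => x) false
    twoSumA_loop nums pair t 0 0

-- ===== PORT B =====
-- for v in sorted(vals): first v with (t>0 and v+t in vals) or (t==0 and nums.count(v)>=2)
def twoSumB_find (nums vals : List Int) (t : Int) : List Int → List Int
  | [] => [1, 1]
  | v :: rest =>
    if (0 < t ∧ (v + t) ∈ vals) ∨ (t = 0 ∧ 2 ≤ nums.count v) then
      let a := pvIdx1 nums v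
      let b := pvIdx1 nums (v + t)
      if a ≤ b then [a, b] else [b, a]
    else twoSumB_find nums vals t rest

def twoSum7_alt (nums : List Int) (target : Int) : List Int :=
  if nums.length < 2 then [1, 1]
  else
    let t := if target < 0 then -target else target
    let vals := PySem.Set.ofList nums
    twoSumB_find nums vals t (PySem.List.sorted vals (fun x => x) false)

-- ===== PRECONDITION & SPEC =====
def Spec_twoSum7 (nums : List Int) (target : Int) (out : List Int) : Prop := out = twoSum7_alt nums target
instance (nums : List Int) (target : Int) (out : List Int) : Decidable (Spec_twoSum7 nums target out) := by unfold Spec_twoSum7; infer_instance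

-- ===== CLAIM (what is proved, stated in full; the proofs are below) =====
def Claim_equal_twoSum7 : Prop := ∀ (nums : List Int) (target : Int), Dom_twoSum7 nums target → Spec_twoSum7 nums target (twoSum7 nums target)

-- ===== LEMMAS AND PROOFS =====

-- Boolean form of the "value v qualifies" predicate both programs search for
def pvQb (nums : List Int) (t v : Int) : Bool :=
  (decide (0 < t) && decide ((v + t) ∈ nums)) || (decide (t = 0) && decide (2 ≤ nums.count v))

theorem pvQb_iff (nums : List Int) (t v : Int) :
    pvQb nums t v = true ↔ ((0 < t ∧ (v + t) ∈ nums) ∨ (t = 0 ∧ 2 ≤ nums.count v)) := by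
  simp [pvQb]

-- canonical result once the minimal qualifying value v is known
def pvRes (nums : List Int) (t v : Int) : List Int :=
  let a := pvIdx1 nums v
  let b := pvIdx1 nums (v + t)
  if a ≤ b then [a, b] else [b, a]

-- canonical form of both programs: find the first qualifying value of l, else [1,1]
def pvFind (nums : List Int) (t : Int) (l : List Int) : List Int :=
  match l.find? (fun v => pvQb nums t v) with
  | some v => pvRes nums t v
  | none => [1, 1]

theorem adv_spec (pair : List Int) (vi t : Int) (j : Nat) :
    j ≤ twoSumA_adv pair vi t j ∧
    (∀ k, j ≤ k → k < twoSumA_adv pair vi t j → k < pair.length ∧ pair.getD k 0 - vi < t) ∧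
    (twoSumA_adv pair vi t j < pair.length → ¬ pair.getD (twoSumA_adv pair vi t j) 0 - vi < t) := by
  rw [twoSumA_adv]
  split_ifs with h
  · obtain ⟨ih1, ih2, ih3⟩ := adv_spec pair vi t (j + 1)
    refine ⟨by omega, ?_, ih3⟩
    intro k hk1 hk2
    rcases Nat.eq_or_lt_of_le hk1 with rfl | hlt
    · exact ⟨h.1, h.2⟩
    · exact ih2 k hlt hk2
  · refine ⟨Nat.le_refl _, fun k hk1 hk2 => absurd (Nat.lt_of_lt_of_le hk2 hk1) (Nat.lt_irrefl k), ?_⟩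
    intro hl hlt
    exact h ⟨hl, hlt⟩
  termination_by pair.length - j
  decreasing_by omega

theorem two_le_count_exists (l : List Int) (v : Int) (h : 2 ≤ l.count v) :
    ∃ m1 m2, m1 < m2 ∧ m2 < l.length ∧ l.getD m1 0 = v ∧ l.getD m2 0 = v := by
  induction l with
  | nil => simp at h
  | cons a l ih =>
    by_cases hav : a = v
    · subst hav
      have h1 : 0 < l.count a := by
        rw [List.count_cons_self] at h; omega
      have hv : a ∈ l := List.count_pos_iff.mp h1
      obtain ⟨m, hm, hme⟩ := List.mem_iff_getElem.mp hv
      refine ⟨0, m + 1, by omega, by simp; omega, by simp, ?_⟩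
      rw [List.getD_cons_succ, List.getD_eq_getElem _ _ hm]
      exact hme
    · have h2 : 2 ≤ l.count v := by
        rw [List.count_cons_of_ne hav] at h; exact h
      obtain ⟨m1, m2, h12, h2l, he1, he2⟩ := ih h2
      exact ⟨m1 + 1, m2 + 1, by omega, by simp; omega, by simpa using he1, by simpa using he2⟩

theorem count_two_of_indices (l : List Int) (v : Int) (m1 m2 : Nat) (h12 : m1 < m2)
    (hl : m2 < l.length) (he1 : l.getD m1 0 = v) (he2 : l.getD m2 0 = v) : 2 ≤ l.count v := by
  have h1 : m1 < l.length := by omega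
  have hA : v ∈ l.take m2 := by
    rw [List.mem_iff_getElem]
    refine ⟨m1, by simp [List.length_take]; omega, ?_⟩
    rw [List.getElem_take, ← List.getD_eq_getElem l 0 h1]
    exact he1
  have hB : v ∈ l.drop m2 := by
    rw [List.mem_iff_getElem]
    refine ⟨0, by simp [List.length_drop]; omega, ?_⟩
    rw [List.getElem_drop, ← List.getD_eq_getElem l 0 (by omega : m2 + 0 < l.length)]
    simpa using he2
  have hA' := List.count_pos_iff.mpr hA
  have hB' := List.count_pos_iff.mpr hB
  calc 2 ≤ (l.take m2).count v + (l.drop m2).count v := by omega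
    _ = l.count v := by rw [← List.count_append, List.take_append_drop]

-- the two-pointer test at row i succeeds exactly when pair[i] qualifies
theorem key_iff (nums pair : List Int)
    (hlen : pair.length = nums.length)
    (hperm : pair.Perm nums)
    (hmono : ∀ p q : Nat, p ≤ q → q < pair.length → pair.getD p 0 ≤ pair.getD q 0)
    (t : Int) (ht : 0 ≤ t) (i j1 : Nat)
    (hi : i < pair.length)
    (hij1 : i < j1)
    (h2i : ∀ k, k < j1 → k < pair.length → (pair.getD k 0 - pair.getD i 0 < t ∨ k ≤ i))
    (h4 : ∀ i', i' < i → i' < pair.length → pvQb nums t (pair.getD i' 0) = false)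
    (h30 : t = 0 → j1 = i + 1) :
    (twoSumA_adv pair (pair.getD i 0) t j1 < nums.length ∧
      pair.getD (twoSumA_adv pair (pair.getD i 0) t j1) 0 - pair.getD i 0 = t) ↔
    pvQb nums t (pair.getD i 0) = true := by
  obtain ⟨ha1, ha2, ha3⟩ := adv_spec pair (pair.getD i 0) t j1
  set vi := pair.getD i 0 with hvi
  set j2 := twoSumA_adv pair vi t j1 with hj2
  constructor
  · rintro ⟨hlt, heq⟩
    have hj2len : j2 < pair.length := by omega
    have hmemv : pair.getD j2 0 ∈ pair := by
      rw [List.getD_eq_getElem _ _ hj2len]; exact List.getElem_mem _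
    rcases lt_or_eq_of_le ht with htpos | ht0
    · rw [pvQb_iff]
      refine Or.inl ⟨htpos, ?_⟩
      have hmm : vi + t ∈ pair := by
        rw [show vi + t = pair.getD j2 0 by omega]; exact hmemv
      exact hperm.mem_iff.mp hmm
    · rw [pvQb_iff]
      refine Or.inr ⟨ht0.symm, ?_⟩
      have hij2 : i < j2 := lt_of_lt_of_le hij1 ha1
      have heq2 : pair.getD j2 0 = vi := by omega
      have h2c : 2 ≤ pair.count vi :=
        count_two_of_indices pair vi i j2 hij2 hj2len rfl heq2
      rw [← hperm.count_eq]
      exact h2c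
  · intro hQ
    rw [pvQb_iff] at hQ
    rcases hQ with ⟨htpos, hmemn⟩ | ⟨htz, hcnt⟩
    · obtain ⟨m, hm, hme⟩ := List.mem_iff_getElem.mp (hperm.mem_iff.mpr hmemn)
      have hmeD : pair.getD m 0 = vi + t := by
        rw [List.getD_eq_getElem _ _ hm]; exact hme
      have hmj1 : j1 ≤ m := by
        by_contra hc
        push_neg at hc
        rcases h2i m hc hm with hlt2 | hle
        · omega
        · have := hmono m i hle hi; omega
      have hj2m : j2 ≤ m := by
        by_contra hc
        push_neg at hc
        have := (ha2 m hmj1 hc).2; omega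
      have hj2len : j2 < pair.length := lt_of_le_of_lt hj2m hm
      have hs := ha3 hj2len
      have hmo := hmono j2 m hj2m hm
      exact ⟨by omega, by omega⟩
    · subst htz
      have hj1e : j1 = i + 1 := h30 rfl
      have hcntp : 2 ≤ pair.count vi := by rw [hperm.count_eq]; exact hcnt
      obtain ⟨m1, m2, h12, hm2, he1, he2⟩ := two_le_count_exists pair vi hcntp
      by_cases hm2i : m2 ≤ i
      · exfalso
        have hm1i : m1 < i := by omega
        have htrue : pvQb nums 0 (pair.getD m1 0) = true := by
          rw [pvQb_iff]
          exact Or.inr ⟨rfl, by rw [he1]; exact hcnt⟩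
        have hfalse := h4 m1 hm1i (by omega)
        rw [hfalse] at htrue
        exact Bool.false_ne_true htrue
      · push_neg at hm2i
        have hi1 : i + 1 < pair.length := by omega
        have hval : pair.getD (i + 1) 0 = vi := by
          by_cases hm1i : m1 ≤ i
          · have l1 := hmono m1 (i + 1) (by omega) hi1
            have l2 := hmono (i + 1) m2 (by omega) hm2
            omega
          · have l1 := hmono i (i + 1) (by omega) hi1
            have l2 := hmono (i + 1) m1 (by omega) (by omega)
            omega
        have hj2e : j2 = i + 1 := by
          rcases Nat.eq_or_lt_of_le ha1 with he | hlt2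
          · omega
          · exfalso
            obtain ⟨hkl, hklt⟩ := ha2 j1 (le_refl _) hlt2
            rw [hj1e] at hklt
            omega
        refine ⟨by omega, by rw [hj2e]; omega⟩

theorem loopA_eq (nums pair : List Int)
    (hlen : pair.length = nums.length)
    (hperm : pair.Perm nums)
    (hmono : ∀ p q : Nat, p ≤ q → q < pair.length → pair.getD p 0 ≤ pair.getD q 0)
    (t : Int) (ht : 0 ≤ t) (i j : Nat)
    (hij : i ≤ j)
    (h2 : ∀ k, k < j → k < pair.length → i < pair.length → (pair.getD k 0 - pair.getD i 0 < t ∨ k ≤ i))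
    (h3 : t = 0 → j = i)
    (h4 : ∀ i', i' < i → i' < pair.length → pvQb nums t (pair.getD i' 0) = false) :
    twoSumA_loop nums pair t i j = pvFind nums t (pair.drop i) := by
  rw [twoSumA_loop]
  by_cases hi : i < nums.length
  · have hi' : i < pair.length := by omega
    rw [if_pos hi]
    simp only []
    set j1 := if i = j then j + 1 else j with hj1d
    have hij1 : i < j1 := by rw [hj1d]; split_ifs with h <;> omega
    have h2i : ∀ k, k < j1 → k < pair.length → (pair.getD k 0 - pair.getD i 0 < t ∨ k ≤ i) := by
      intro k hk hkl
      rw [hj1d] at hk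
      split_ifs at hk with h
      · exact Or.inr (by omega)
      · exact h2 k hk hkl hi'
    have h30' : t = 0 → j1 = i + 1 := by
      intro h0
      rw [hj1d, h3 h0]
      simp
    have hkey := key_iff nums pair hlen hperm hmono t ht i j1 hi' hij1 h2i h4 h30'
    obtain ⟨ha1, ha2, ha3⟩ := adv_spec pair (pair.getD i 0) t j1
    set j2 := twoSumA_adv pair (pair.getD i 0) t j1 with hj2d
    have hdrop : pair.drop i = pair.getD i 0 :: pair.drop (i + 1) := by
      rw [List.getD_eq_getElem _ _ hi']; exact List.drop_eq_getElem_cons hi'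
    by_cases hT : j2 < nums.length ∧ pair.getD j2 0 - pair.getD i 0 = t
    · rw [if_pos hT]
      have hQ := hkey.mp hT
      unfold pvFind
      rw [hdrop, List.find?_cons_of_pos hQ]
      have hv2 : pair.getD j2 0 = pair.getD i 0 + t := by omega
      rw [hv2]
      unfold pvRes
      simp only []
      split_ifs with h1 h2x <;> first | rfl | (exfalso; omega)
    · rw [if_neg hT]
      have hQ : pvQb nums t (pair.getD i 0) = false := by
        rw [Bool.eq_false_iff]
        intro hev
        exact hT (hkey.mpr hev)
      rw [loopA_eq nums pair hlen hperm hmono t ht (i + 1) j2 (by omega)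
        (by
          intro k hk hkl hi1
          by_cases hkj1 : k < j1
          · rcases h2i k hkj1 hkl with hlt | hle
            · have := hmono i (i + 1) (by omega) hi1
              exact Or.inl (by omega)
            · exact Or.inr (by omega)
          · push_neg at hkj1
            have hx := (ha2 k hkj1 hk).2
            have := hmono i (i + 1) (by omega) hi1
            exact Or.inl (by omega))
        (by
          intro h0
          have hj1e : j1 = i + 1 := h30' h0
          rcases Nat.eq_or_lt_of_le ha1 with he | hlt2
          · omega
          · exfalso
            obtain ⟨hkl, hklt⟩ := ha2 j1 (le_refl _) hlt2
            have := hmono i j1 (by omega) hkl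
            omega)
        (by
          intro i' hi'' hil
          rcases Nat.lt_succ_iff_lt_or_eq.mp hi'' with hlt | heq
          · exact h4 i' hlt hil
          · rw [heq]; exact hQ)]
      unfold pvFind
      rw [hdrop, List.find?_cons_of_neg (by
        have hQ' := hQ
        simp only [List.getD] at hQ'
        simp [hQ'])]
  · rw [if_neg hi]
    have hnil : pair.drop i = [] := List.drop_eq_nil_of_le (by omega)
    rw [hnil]
    rfl
  termination_by nums.length - i
  decreasing_by omega

theorem findB_eq (nums vals : List Int) (t : Int)
    (hv : ∀ x : Int, x ∈ vals ↔ x ∈ nums) (l : List Int) :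
    twoSumB_find nums vals t l = pvFind nums t l := by
  induction l with
  | nil => rfl
  | cons v rest ih =>
    rw [twoSumB_find]
    by_cases hc : (0 < t ∧ (v + t) ∈ vals) ∨ (t = 0 ∧ 2 ≤ nums.count v)
    · rw [if_pos hc]
      have hq : pvQb nums t v = true := by
        rw [pvQb_iff]
        rcases hc with ⟨h1, h2⟩ | h
        · exact Or.inl ⟨h1, (hv _).mp h2⟩
        · exact Or.inr h
      unfold pvFind
      rw [List.find?_cons_of_pos hq]
      rfl
    · rw [if_neg hc]
      have hq : pvQb nums t v = false := by
        rw [Bool.eq_false_iff, Ne, pvQb_iff]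
        intro hx
        rcases hx with ⟨h1, h2⟩ | h
        · exact hc (Or.inl ⟨h1, (hv _).mpr h2⟩)
        · exact hc (Or.inr h)
      unfold pvFind
      rw [List.find?_cons_of_neg (by simp [hq])]
      exact ih

theorem find?_sorted_min {l : List Int} (hs : l.Pairwise (· ≤ ·)) {p : Int → Bool} {v : Int}
    (h : l.find? p = some v) : v ∈ l ∧ p v = true ∧ ∀ w ∈ l, p w = true → v ≤ w := by
  induction l with
  | nil => simp at h
  | cons a l ih =>
    rcases List.pairwise_cons.mp hs with ⟨ha, hl⟩
    by_cases hpa : p a = true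
    · rw [List.find?_cons_of_pos hpa] at h
      injection h with h; subst h
      refine ⟨List.mem_cons_self, hpa, ?_⟩
      intro w hw _
      rcases List.mem_cons.mp hw with rfl | hw
      · exact le_refl _
      · exact ha w hw
    · rw [List.find?_cons_of_neg (by simp [hpa])] at h
      obtain ⟨h1, h2, h3⟩ := ih hl h
      refine ⟨List.mem_cons_of_mem _ h1, h2, ?_⟩
      intro w hw hpw
      rcases List.mem_cons.mp hw with rfl | hw
      · exact absurd hpw hpa
      · exact h3 w hw hpw

theorem find?_congr_sorted (l1 l2 : List Int)
    (h1 : l1.Pairwise (· ≤ ·)) (h2 : l2.Pairwise (· ≤ ·))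
    (hm : ∀ x : Int, x ∈ l1 ↔ x ∈ l2) (p : Int → Bool) :
    l1.find? p = l2.find? p := by
  cases e1 : l1.find? p with
  | none =>
    cases e2 : l2.find? p with
    | none => rfl
    | some v =>
      obtain ⟨c1, c2, _⟩ := find?_sorted_min h2 e2
      exact absurd c2 (List.find?_eq_none.mp e1 v ((hm v).mpr c1))
  | some v =>
    obtain ⟨c1, c2, c3⟩ := find?_sorted_min h1 e1
    cases e2 : l2.find? p with
    | none => exact absurd c2 (List.find?_eq_none.mp e2 v ((hm v).mp c1))
    | some w =>
      obtain ⟨d1, d2, d3⟩ := find?_sorted_min h2 e2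
      have : v = w := le_antisymm (c3 w ((hm w).mpr d1) d2) (d3 v ((hm v).mp c1) c2)
      rw [this]

-- ===== VERDICT (by name: the statement is the Claim_ definition above) =====
theorem twoSum7_spec : Claim_equal_twoSum7 := by
  intro nums target _
  unfold Spec_twoSum7 twoSum7 twoSum7_alt
  by_cases hn : nums.length < 2
  · simp only [if_pos hn]
  · simp only [if_neg hn]
    have ht : (0:Int) ≤ if target < 0 then -target else target := by split_ifs with h <;> omega
    set t := if target < 0 then -target else target with hts
    set pair := PySem.List.sorted nums (fun x => x) false with hpd
    have hlen : pair.length = nums.length := PySem.List.length_sorted nums _ false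
    have hperm : pair.Perm nums := PySem.List.sorted_perm nums _ false
    have hmono : ∀ p q : Nat, p ≤ q → q < pair.length → pair.getD p 0 ≤ pair.getD q 0 := by
      intro p q hpq hq
      rw [List.getD_eq_getElem _ _ (Nat.lt_of_le_of_lt hpq hq), List.getD_eq_getElem _ _ hq]
      exact PySem.List.sorted_id_getElem_mono nums hpq hq
    rw [loopA_eq nums pair hlen hperm hmono t ht 0 0 (Nat.le_refl 0)
        (by intro k hk; omega) (fun _ => rfl) (by intro i' hi'; omega)]
    rw [findB_eq nums (PySem.Set.ofList nums) t (fun x => PySem.Set.mem_ofList nums x)]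
    unfold pvFind
    rw [List.drop_zero, find?_congr_sorted pair (PySem.List.sorted (PySem.Set.ofList nums) (fun x => x) false)
      (by simpa using PySem.List.sorted_pairwise nums (fun x => x))
      ((PySem.List.sorted_ofList_pairwise_lt nums).imp (fun h => le_of_lt h))
      (by intro x
          rw [hpd, PySem.List.mem_sorted, PySem.List.mem_sorted, PySem.Set.mem_ofList])
      (fun v => pvQb nums t v)]
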